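-- pv_equiv track=rewrite | github.com/AxWise-GmbH/axwise-flow | backend/api/routes/customer_research_simple.py | extract_business_context
-- ===== SOURCE A (Python) =====
-- from typing import Dict, List, Any, Optional
--
-- def extract_business_context(conversation_text: str, latest_input: str) -> Dict[str, Any]:
--     """Simple keyword-based context extraction."""
--
--     # Handle None values safely
--     safe_conversation = conversation_text or ""
--     safe_input = latest_input or ""
--     all_text = f"{safe_conversation} {safe_input}".lower()
--
--     # Simple business idea detection
--     business_idea = None
--     if any(word in all_text for word in ['app', 'platform', 'tool', 'service', 'product', 'system', 'software']):
--         if 'laundry' in all_text: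
--             business_idea = "A laundry service or platform"
--         elif 'food' in all_text or 'restaurant' in all_text:
--             business_idea = "A food or restaurant service"
--         elif 'education' in all_text or 'learning' in all_text:
--             business_idea = "An educational platform or service"
--         else:
--             business_idea = "A digital solution or service"
--
--     # Simple customer detection
--     target_customer = None
--     if any(word in all_text for word in ['users', 'customers', 'people', 'teams', 'companies', 'businesses']):
--         if 'students' in all_text:
--             target_customer = "Students"
--         elif 'business' in all_text or 'companies' in all_text:
--             target_customer = "Businesses or companies"
--         elif 'families' in all_text:
--             target_customer = "Families"
--         else:
--             target_customer = "General users or customers"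
--
--     # Simple problem detection
--     problem = None
--     if any(word in all_text for word in ['problem', 'issue', 'challenge', 'pain', 'difficulty', 'frustration']):
--         if 'time' in all_text:
--             problem = "Time-related challenges"
--         elif 'cost' in all_text or 'expensive' in all_text:
--             problem = "Cost or pricing issues"
--         elif 'quality' in all_text:
--             problem = "Quality concerns"
--         else:
--             problem = "General problems or challenges"
--
--     return {
--         "business_idea": business_idea,
--         "target_customer": target_customer,
--         "problem": problem
--     }
-- ===== SOURCE B (Python) =====
-- _ALL_KEYWORDS = [
--     'app', 'platform', 'tool', 'service', 'product', 'system', 'software',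
--     'laundry', 'food', 'restaurant', 'education', 'learning',
--     'users', 'customers', 'people', 'teams', 'companies', 'businesses',
--     'students', 'business', 'families',
--     'problem', 'issue', 'challenge', 'pain', 'difficulty', 'frustration',
--     'time', 'cost', 'expensive', 'quality',
-- ]
--
--
-- def extract_business_context(conversation_text: str, latest_input: str):
--     all_text = f"{conversation_text or ''} {latest_input or ''}".lower()
--     # One pass over the text per keyword, done once up front: the set of keywords present.
--     hits = {w for w in _ALL_KEYWORDS if w in all_text}
--
--     def field(gates, rules, default):
--         if hits.isdisjoint(gates):
--             return None
--         # Reverse overwrite fold: process rules back-to-front, each matching rule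
--         # overwrites the accumulator, so the earliest matching rule wins.
--         res = default
--         for group, result in reversed(rules):
--             if not hits.isdisjoint(group):
--                 res = result
--         return res
--
--     return {
--         "business_idea": field(
--             ['app', 'platform', 'tool', 'service', 'product', 'system', 'software'],
--             [(['laundry'], "A laundry service or platform"),
--              (['food', 'restaurant'], "A food or restaurant service"),
--              (['education', 'learning'], "An educational platform or service")],
--             "A digital solution or service"),
--         "target_customer": field(
--             ['users', 'customers', 'people', 'teams', 'companies', 'businesses'],
--             [(['students'], "Students"),
--              (['business', 'companies'], "Businesses or companies"),
--              (['families'], "Families")],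
--             "General users or customers"),
--         "problem": field(
--             ['problem', 'issue', 'challenge', 'pain', 'difficulty', 'frustration'],
--             [(['time'], "Time-related challenges"),
--              (['cost', 'expensive'], "Cost or pricing issues"),
--              (['quality'], "Quality concerns")],
--             "General problems or challenges"),
--     }
-- ===== Notes on version B (the rewrite author's own statement) =====
-- stated objective: alternative
-- what changed: B first scans the text once to build the set of all keywords it contains, then computes each field from that hit set by a reverse overwrite fold over the rules (last overwrite = earliest matching rule), instead of A's inline substring tests in three forward if/elif chains.
import Mathlib
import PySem

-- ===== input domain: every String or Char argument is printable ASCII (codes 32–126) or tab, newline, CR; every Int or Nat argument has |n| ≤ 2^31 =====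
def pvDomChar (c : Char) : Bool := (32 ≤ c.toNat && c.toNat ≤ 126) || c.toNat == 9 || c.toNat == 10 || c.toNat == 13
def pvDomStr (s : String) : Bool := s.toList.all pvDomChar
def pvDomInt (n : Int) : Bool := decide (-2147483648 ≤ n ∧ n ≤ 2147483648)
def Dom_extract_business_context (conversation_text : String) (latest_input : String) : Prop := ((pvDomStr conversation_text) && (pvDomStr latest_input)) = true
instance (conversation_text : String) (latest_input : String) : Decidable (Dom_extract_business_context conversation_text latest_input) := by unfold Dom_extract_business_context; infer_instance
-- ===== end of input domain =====

-- B precomputes the set of keywords present in the text once, then derives each field from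
-- that hit set by a reverse overwrite fold over its rules, instead of A's inline substring
-- tests in three forward if/elif chains (objective: alternative).


-- ===== PORT A =====
def extract_business_context (conversation_text : String) (latest_input : String) : List (String × Option String) :=
  let safe_conversation := if conversation_text = "" then "" else conversation_text
  let safe_input := if latest_input = "" then "" else latest_input
  let all_text := PySem.Str.lower (safe_conversation ++ " " ++ safe_input)
  let business_idea : Option String :=
    if ["app", "platform", "tool", "service", "product", "system", "software"].any
        (fun w => PySem.Str.isIn w all_text) then
      if PySem.Str.isIn "laundry" all_text then some "A laundry service or platform"
      else if PySem.Str.isIn "food" all_text || PySem.Str.isIn "restaurant" all_text then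
        some "A food or restaurant service"
      else if PySem.Str.isIn "education" all_text || PySem.Str.isIn "learning" all_text then
        some "An educational platform or service"
      else some "A digital solution or service"
    else none
  let target_customer : Option String :=
    if ["users", "customers", "people", "teams", "companies", "businesses"].any
        (fun w => PySem.Str.isIn w all_text) then
      if PySem.Str.isIn "students" all_text then some "Students"
      else if PySem.Str.isIn "business" all_text || PySem.Str.isIn "companies" all_text then
        some "Businesses or companies"
      else if PySem.Str.isIn "families" all_text then some "Families"
      else some "General users or customers"
    else none
  let problem : Option String :=
    if ["problem", "issue", "challenge", "pain", "difficulty", "frustration"].any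
        (fun w => PySem.Str.isIn w all_text) then
      if PySem.Str.isIn "time" all_text then some "Time-related challenges"
      else if PySem.Str.isIn "cost" all_text || PySem.Str.isIn "expensive" all_text then
        some "Cost or pricing issues"
      else if PySem.Str.isIn "quality" all_text then some "Quality concerns"
      else some "General problems or challenges"
    else none
  [("business_idea", business_idea), ("target_customer", target_customer), ("problem", problem)]

-- ===== PORT B =====
def pvAllKeywords : List String :=
  ["app", "platform", "tool", "service", "product", "system", "software",
   "laundry", "food", "restaurant", "education", "learning",
   "users", "customers", "people", "teams", "companies", "businesses",
   "students", "business", "families",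
   "problem", "issue", "challenge", "pain", "difficulty", "frustration",
   "time", "cost", "expensive", "quality"]

-- B's field helper: gate via the hit set, then a reverse overwrite fold over the rules.
def pvFieldB (hits : List String) (gates : List String)
    (rules : List (List String × String)) (dflt : String) : Option String :=
  if gates.any (fun w => hits.contains w) then
    some (rules.reverse.foldl
      (fun res gr => if gr.1.any (fun w => hits.contains w) then gr.2 else res) dflt)
  else none

def extract_business_context_alt (conversation_text : String) (latest_input : String) :
    List (String × Option String) :=
  let all_text := PySem.Str.lower
    ((if conversation_text = "" then "" else conversation_text) ++ " " ++
     (if latest_input = "" then "" else latest_input))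
  -- the set of keywords present in the text (membership-only use; list of hits)
  let hits := pvAllKeywords.filter (fun w => PySem.Str.isIn w all_text)
  [("business_idea",
    pvFieldB hits ["app", "platform", "tool", "service", "product", "system", "software"]
      [(["laundry"], "A laundry service or platform"),
       (["food", "restaurant"], "A food or restaurant service"),
       (["education", "learning"], "An educational platform or service")]
      "A digital solution or service"),
   ("target_customer",
    pvFieldB hits ["users", "customers", "people", "teams", "companies", "businesses"]
      [(["students"], "Students"),
       (["business", "companies"], "Businesses or companies"),
       (["families"], "Families")]
      "General users or customers"),
   ("problem",
    pvFieldB hits ["problem", "issue", "challenge", "pain", "difficulty", "frustration"]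
      [(["time"], "Time-related challenges"),
       (["cost", "expensive"], "Cost or pricing issues"),
       (["quality"], "Quality concerns")]
      "General problems or challenges")]

-- ===== PRECONDITION & SPEC =====
def Spec_extract_business_context (conversation_text : String) (latest_input : String) (out : List (String × Option String)) : Prop := out = extract_business_context_alt conversation_text latest_input
instance (conversation_text : String) (latest_input : String) (out : List (String × Option String)) : Decidable (Spec_extract_business_context conversation_text latest_input out) := by unfold Spec_extract_business_context; infer_instance

-- ===== CLAIM (what is proved, stated in full; the proofs are below) =====
def Claim_equal_extract_business_context : Prop := ∀ (conversation_text : String) (latest_input : String), Dom_extract_business_context conversation_text latest_input → Spec_extract_business_context conversation_text latest_input (extract_business_context conversation_text latest_input)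

-- ===== LEMMAS AND PROOFS =====

-- ===== VERDICT (by name: the statement is the Claim_ definition above) =====
set_option maxHeartbeats 2000000 in
theorem extract_business_context_spec : Claim_equal_extract_business_context := by
  intro c l _
  unfold Spec_extract_business_context
  simp [extract_business_context, extract_business_context_alt, pvFieldB,
    pvAllKeywords, apply_ite Option.some]
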